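-- pv_equiv track=rewrite | github.com/OlaszPL/Introduction_to_computer_science_course | Zestaw4/zad17.py | zad17
-- ===== SOURCE A (Python) =====
-- def zad17(T):
--     n = len(T)
--     max_sum = 0
--     res_row, res_column = 0, 0
--
--     for row in range(1, n - 1): # bo to co napisalem wyzej
--         for column in range(1, n - 1):
--             sum = 0
--             for n_row in range(row - 1, row + 2):
--                 for n_column in range(column - 1, column + 2):
--                     sum += T[n_row][n_column]
--             sum -= T[row][column]
--             if sum > max_sum:
--                 max_sum = sum
--                 res_row, res_column = row, column
--
--     return res_row, res_column
-- ===== SOURCE B (Python) =====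
-- def zad17(T):
--     n = len(T)
--     # per-row prefix sums: P[r][k] = sum of T[r][:k]
--     P = []
--     for row in T:
--         acc = 0
--         p = [0]
--         for x in row:
--             acc += x
--             p.append(acc)
--         P.append(p)
--
--     max_sum = 0
--     res_row, res_column = 0, 0
--     for row in range(1, n - 1):
--         for column in range(1, n - 1):
--             s = (P[row - 1][column + 2] - P[row - 1][column - 1]
--                  + P[row][column + 2] - P[row][column - 1]
--                  + P[row + 1][column + 2] - P[row + 1][column - 1]
--                  - T[row][column])
--             if s > max_sum:
--                 max_sum = s
--                 res_row, res_column = row, column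
--     return res_row, res_column
-- ===== Notes on version B (the rewrite author's own statement) =====
-- stated objective: faster
-- what changed: Replaces the per-cell 3x3 nested neighborhood scan with per-row prefix-sum tables built once, so each interior cell's score is six table lookups and constant arithmetic instead of a 9-element double loop.
import Mathlib
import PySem

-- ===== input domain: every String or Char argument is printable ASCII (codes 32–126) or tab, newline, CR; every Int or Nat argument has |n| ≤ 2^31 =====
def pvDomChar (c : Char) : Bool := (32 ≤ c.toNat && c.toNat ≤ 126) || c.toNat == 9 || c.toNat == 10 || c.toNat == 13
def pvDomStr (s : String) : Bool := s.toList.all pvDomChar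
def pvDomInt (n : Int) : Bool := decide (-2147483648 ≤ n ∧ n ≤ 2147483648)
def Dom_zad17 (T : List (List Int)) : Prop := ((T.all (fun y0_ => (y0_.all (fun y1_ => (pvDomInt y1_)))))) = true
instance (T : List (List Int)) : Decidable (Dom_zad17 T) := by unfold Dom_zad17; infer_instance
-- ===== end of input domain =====

-- B replaces the per-cell 3x3 double scan by per-row prefix-sum tables built once (six lookups per cell); same cost class, different structure.


-- ===== PORT A =====
def zad17 (T : List (List Int)) : Int × Int :=
  let n : Int := T.length
  let st :=
    (PySem.List.pyRange 1 (n-1) 1).foldl (fun st row =>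
      (PySem.List.pyRange 1 (n-1) 1).foldl (fun st column =>
        let s : Int :=
          (PySem.List.pyRange (row-1) (row+2) 1).foldl (fun s nrow =>
            (PySem.List.pyRange (column-1) (column+2) 1).foldl (fun s ncolumn =>
              s + PySem.List.pyGetD (PySem.List.pyGetD T nrow []) ncolumn 0) s) 0
        let s := s - PySem.List.pyGetD (PySem.List.pyGetD T row []) column 0
        if s > st.1 then (s, row, column) else st) st)
      ((0:Int), (0:Int), (0:Int))
  (st.2.1, st.2.2)

-- ===== PORT B =====
-- p = [0]; for x in row: acc += x; p.append(acc)
def zad17RowPref (row : List Int) : List Int :=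
  (row.foldl (fun (st : Int × List Int) x => (st.1 + x, st.2 ++ [st.1 + x])) ((0:Int), [0])).2

-- P[r][c]
def zad17Pref2 (P : List (List Int)) (r c : Int) : Int :=
  PySem.List.pyGetD (PySem.List.pyGetD P r []) c 0

def zad17_alt (T : List (List Int)) : Int × Int :=
  let n : Int := T.length
  let P := T.map zad17RowPref
  let st :=
    (PySem.List.pyRange 1 (n-1) 1).foldl (fun st row =>
      (PySem.List.pyRange 1 (n-1) 1).foldl (fun st column =>
        let s : Int :=
          zad17Pref2 P (row-1) (column+2) - zad17Pref2 P (row-1) (column-1)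
          + zad17Pref2 P row (column+2) - zad17Pref2 P row (column-1)
          + zad17Pref2 P (row+1) (column+2) - zad17Pref2 P (row+1) (column-1)
          - PySem.List.pyGetD (PySem.List.pyGetD T row []) column 0
        if s > st.1 then (s, row, column) else st) st)
      ((0:Int), (0:Int), (0:Int))
  (st.2.1, st.2.2)

-- ===== PRECONDITION & SPEC =====
-- Pre_ excludes exactly the ragged inputs on which A raises IndexError: when len(T) ≥ 3,
-- A reads T[r][c] for all r,c < len(T), so it raises iff some row is shorter than len(T).
def Pre_zad17 (T : List (List Int)) : Prop :=
  T.length ≤ 2 ∨ ∀ row ∈ T, (T.length : Int) ≤ row.length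
instance (T : List (List Int)) : Decidable (Pre_zad17 T) := by unfold Pre_zad17; infer_instance

def pvWitness_zad17 : List (List Int) := [[1, 2, 3], [4, 5, 6], [7, 8, 9]]

def Spec_zad17 (T : List (List Int)) (out : Int × Int) : Prop := out = zad17_alt T
instance (T : List (List Int)) (out : Int × Int) : Decidable (Spec_zad17 T out) := by unfold Spec_zad17; infer_instance

-- ===== CLAIM (what is proved, stated in full; the proofs are below) =====
def Claim_equal_zad17 : Prop := ∀ (T : List (List Int)), Dom_zad17 T → Pre_zad17 T → Spec_zad17 T (zad17 T)

-- ===== LEMMAS AND PROOFS =====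

-- invariant of B's prefix-building loop
lemma zad17RowPref_aux (xs : List Int) (acc : Int) (p : List Int) :
    (xs.foldl (fun (st : Int × List Int) x => (st.1 + x, st.2 ++ [st.1 + x])) (acc, p)).2
      = p ++ (List.range xs.length).map (fun k => acc + (xs.take (k+1)).sum) := by
  induction xs generalizing acc p with
  | nil => simp
  | cons x xs ih =>
      simp only [List.foldl_cons, ih, List.length_cons, List.range_succ_eq_map,
        List.map_cons, List.map_map, List.take_succ_cons, List.sum_cons]
      simp [Function.comp_def, List.append_assoc, add_assoc]

lemma zad17RowPref_eq (xs : List Int) :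
    zad17RowPref xs = (List.range (xs.length + 1)).map (fun k => (xs.take k).sum) := by
  unfold zad17RowPref
  rw [zad17RowPref_aux]
  rw [List.range_succ_eq_map, List.map_cons]
  simp [Function.comp_def]

lemma zad17_take_succ_sum (xs : List Int) (k : Nat) (h : k < xs.length) :
    (xs.take (k+1)).sum = (xs.take k).sum + xs.getD k 0 := by
  rw [List.take_add_one, List.sum_append, List.getElem?_eq_getElem h]
  simp [List.getD, List.getElem?_eq_getElem h]

-- P[r][c+2] - P[r][c-1] = row[c-1] + row[c] + row[c+1]
lemma zad17_prefdiff (xs : List Int) (c : Int) (h1 : 1 ≤ c) (h2 : c + 2 ≤ (xs.length : Int)) :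
    PySem.List.pyGetD (zad17RowPref xs) (c+2) 0 - PySem.List.pyGetD (zad17RowPref xs) (c-1) 0
      = xs.getD (c-1).toNat 0 + xs.getD c.toNat 0 + xs.getD (c+1).toNat 0 := by
  rw [zad17RowPref_eq]
  rw [PySem.List.pyGetD_of_nonneg _ _ (by omega), PySem.List.pyGetD_of_nonneg _ _ (by omega)]
  have hc2 : (c+2).toNat < xs.length + 1 := by omega
  have hc1 : (c-1).toNat < xs.length + 1 := by omega
  rw [PySem.List.getD_map_range _ _ _ _ hc2, PySem.List.getD_map_range _ _ _ _ hc1]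
  have e2 : (c+2).toNat = (c-1).toNat + 3 := by omega
  have e1 : c.toNat = (c-1).toNat + 1 := by omega
  have e0 : (c+1).toNat = (c-1).toNat + 2 := by omega
  rw [e2, e1, e0]
  have s1 := zad17_take_succ_sum xs ((c-1).toNat) (by omega)
  have s2 := zad17_take_succ_sum xs ((c-1).toNat + 1) (by omega)
  have s3 := zad17_take_succ_sum xs ((c-1).toNat + 2) (by omega)
  simp only [show (c-1).toNat + 1 + 1 = (c-1).toNat + 2 from rfl] at s2
  simp only [show (c-1).toNat + 2 + 1 = (c-1).toNat + 3 from rfl] at s3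
  omega

lemma zad17_pyRange_three (a b : Int) (h : b = a + 3) :
    PySem.List.pyRange a b 1 = [a, a+1, a+2] := by
  subst h
  rw [PySem.List.pyRange_one_cons (by omega), PySem.List.pyRange_one_cons (by omega),
      PySem.List.pyRange_one_cons (by omega), PySem.List.pyRange_one_eq_nil (by omega)]
  norm_num [add_assoc]

-- one row's contribution: prefix-sum difference = three direct reads
lemma zad17_rowterm (T : List (List Int))
    (hlen : ∀ row ∈ T, (T.length : Int) ≤ row.length)
    (r c : Int) (hr1 : 0 ≤ r) (hr2 : r < (T.length : Int))
    (hc1 : 1 ≤ c) (hc2 : c + 2 ≤ (T.length : Int)) :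
    zad17Pref2 (T.map zad17RowPref) r (c+2) - zad17Pref2 (T.map zad17RowPref) r (c-1)
      = PySem.List.pyGetD (PySem.List.pyGetD T r []) (c-1) 0
        + PySem.List.pyGetD (PySem.List.pyGetD T r []) c 0
        + PySem.List.pyGetD (PySem.List.pyGetD T r []) (c+1) 0 := by
  have hrn : r.toNat < T.length := by omega
  have hT : PySem.List.pyGetD T r [] = T[r.toNat] :=
    PySem.List.pyGetD_eq_getElem T [] hr1 (by exact_mod_cast hr2)
  have hx : (T.length : Int) ≤ (T[r.toNat]).length :=
    hlen _ (List.getElem_mem hrn)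
  unfold zad17Pref2
  rw [PySem.List.pyGetD_eq_getElem (T.map zad17RowPref) [] hr1 (by simpa using hr2),
      List.getElem_map]
  rw [zad17_prefdiff (T[r.toNat]) c hc1 (by omega)]
  rw [hT, PySem.List.pyGetD_of_nonneg _ _ (by omega),
      PySem.List.pyGetD_of_nonneg _ _ (by omega),
      PySem.List.pyGetD_of_nonneg _ _ (by omega)]

-- per-cell equality of the two scores
lemma zad17_cell_eq (T : List (List Int))
    (hlen : ∀ row ∈ T, (T.length : Int) ≤ row.length)
    (row column : Int) (hr1 : 1 ≤ row) (hr2 : row < (T.length : Int) - 1)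
    (hc1 : 1 ≤ column) (hc2 : column < (T.length : Int) - 1) :
    (PySem.List.pyRange (row-1) (row+2) 1).foldl (fun s nrow =>
        (PySem.List.pyRange (column-1) (column+2) 1).foldl (fun s ncolumn =>
          s + PySem.List.pyGetD (PySem.List.pyGetD T nrow []) ncolumn 0) s) 0
      = zad17Pref2 (T.map zad17RowPref) (row-1) (column+2) - zad17Pref2 (T.map zad17RowPref) (row-1) (column-1)
        + zad17Pref2 (T.map zad17RowPref) row (column+2) - zad17Pref2 (T.map zad17RowPref) row (column-1)
        + zad17Pref2 (T.map zad17RowPref) (row+1) (column+2) - zad17Pref2 (T.map zad17RowPref) (row+1) (column-1) := by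
  rw [zad17_pyRange_three (row-1) (row+2) (by ring),
      zad17_pyRange_three (column-1) (column+2) (by ring)]
  simp only [List.foldl_cons, List.foldl_nil]
  have er1 : row - 1 + 1 = row := by ring
  have er2 : row - 1 + 2 = row + 1 := by ring
  have ec1 : column - 1 + 1 = column := by ring
  have ec2 : column - 1 + 2 = column + 1 := by ring
  rw [er1, er2, ec1, ec2]
  have h1 := zad17_rowterm T hlen (row-1) column (by omega) (by omega) hc1 (by omega)
  have h2 := zad17_rowterm T hlen row column (by omega) (by omega) hc1 (by omega)
  have h3 := zad17_rowterm T hlen (row+1) column (by omega) (by omega) hc1 (by omega)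
  linarith

-- ===== VERDICT (by name: the statement is the Claim_ definition above) =====
theorem zad17_spec : Claim_equal_zad17 := by
  intro T _hDom hPre
  unfold Spec_zad17
  simp only [zad17, zad17_alt]
  rcases hPre with hsmall | hlen
  · rw [PySem.List.pyRange_one_eq_nil (a := 1) (b := (T.length : Int) - 1) (by omega)]
    simp
  · refine congrArg (fun st : Int × Int × Int => (st.2.1, st.2.2)) ?_
    apply PySem.List.foldl_congr_mem
    intro st row hrow
    rw [PySem.List.mem_pyRange_one] at hrow
    apply PySem.List.foldl_congr_mem
    intro st' column hcol
    rw [PySem.List.mem_pyRange_one] at hcol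
    rw [zad17_cell_eq T hlen row column hrow.1 (by omega) hcol.1 (by omega)]
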